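-- pv_equiv track=rewrite | github.com/Sam-v6/mece-6397-doe | project2/src/hp_opt.py | generate_full_factorial_design
-- ===== SOURCE A (Python) =====
-- import itertools
--
-- def generate_full_factorial_design(factors):
--     levels = list(factors.values())
--     design = list(itertools.product(*levels))
--
--     # Convert each combination into a dictionary
--     design_matrix = []
--     for combo in design:
--         single_design = {}
--         for i, factor in enumerate(factors.keys()):
--             single_design[factor] = combo[i]
--         design_matrix.append(single_design)
--
--     # Return list that has dicts inside
--     return design_matrix
-- ===== SOURCE B (Python) =====
-- def generate_full_factorial_design(factors):
--     result = [{}]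
--     for factor, levels in factors.items():
--         result = [dict(partial, **{factor: level})
--                   for partial in result for level in levels]
--     return result
-- ===== Notes on version B (the rewrite author's own statement) =====
-- stated objective: simpler
-- what changed: Replaces itertools.product over the value lists plus a second pass rebuilding dicts by enumerate/index with a single incremental fold: start from one empty partial dict and extend every partial by every level of each factor in turn.
import Mathlib
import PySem

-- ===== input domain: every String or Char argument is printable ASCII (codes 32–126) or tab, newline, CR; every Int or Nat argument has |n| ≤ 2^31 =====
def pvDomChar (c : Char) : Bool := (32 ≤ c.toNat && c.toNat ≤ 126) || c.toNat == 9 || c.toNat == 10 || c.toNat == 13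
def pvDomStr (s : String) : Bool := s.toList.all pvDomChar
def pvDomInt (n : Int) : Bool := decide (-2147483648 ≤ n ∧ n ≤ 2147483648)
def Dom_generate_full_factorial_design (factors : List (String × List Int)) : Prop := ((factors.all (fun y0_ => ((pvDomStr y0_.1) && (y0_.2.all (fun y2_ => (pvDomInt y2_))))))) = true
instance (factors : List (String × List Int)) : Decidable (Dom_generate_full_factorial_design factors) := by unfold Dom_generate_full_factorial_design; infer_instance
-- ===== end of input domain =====

-- B replaces itertools.product + a dict-rebuilding second pass by one incremental fold
-- extending partial dicts factor by factor (same cost, simpler; return value only).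

-- ===== PORT A =====
-- itertools.product(*levels), last factor varies fastest
def pvProdA : List (List Int) → List (List Int)
  | [] => [[]]
  | l :: ls => l.flatMap (fun x => (pvProdA ls).map (fun c => x :: c))

-- inner loop `for i, factor in enumerate(factors.keys()): single_design[factor] = combo[i]`;
-- zip is exact here because every combo produced by product has exactly keys.length entries,
-- so combo[i] is always in range.
def pvBuildA (keys : List String) (combo : List Int) : PySem.Dict String Int :=
  (keys.zip combo).foldl (fun d kv => d.insert kv.1 kv.2) PySem.Dict.empty

def generate_full_factorial_design (factors : List (String × List Int)) : List (List (String × Int)) :=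
  let levels := factors.map (·.2)
  let design := pvProdA levels
  design.map (fun combo => (pvBuildA (factors.map (·.1)) combo).items)

-- ===== PORT B =====
def generate_full_factorial_design_alt (factors : List (String × List Int)) : List (List (String × Int)) :=
  (factors.foldl
      (fun result kl => result.flatMap (fun p => kl.2.map (fun v => p.insert kl.1 v)))
      [PySem.Dict.empty]).map PySem.Dict.items

-- ===== PRECONDITION & SPEC =====
def Spec_generate_full_factorial_design (factors : List (String × List Int)) (out : List (List (String × Int))) : Prop := out = generate_full_factorial_design_alt factors
instance (factors : List (String × List Int)) (out : List (List (String × Int))) : Decidable (Spec_generate_full_factorial_design factors out) := by unfold Spec_generate_full_factorial_design; infer_instance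

-- ===== CLAIM (what is proved, stated in full; the proofs are below) =====
def Claim_equal_generate_full_factorial_design : Prop := ∀ (factors : List (String × List Int)), Dom_generate_full_factorial_design factors → Spec_generate_full_factorial_design factors (generate_full_factorial_design factors)

-- ===== LEMMAS AND PROOFS =====

-- extend a partial dict d by the (key, value) pairs of keys.zip combo
def pvExt (d : PySem.Dict String Int) (keys : List String) (combo : List Int) : PySem.Dict String Int :=
  (keys.zip combo).foldl (fun d kv => d.insert kv.1 kv.2) d

theorem pvFoldl_eq_flatMap_prod (factors : List (String × List Int)) :
    ∀ (acc : List (PySem.Dict String Int)),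
      factors.foldl
          (fun result kl => result.flatMap (fun p => kl.2.map (fun v => p.insert kl.1 v))) acc
        = acc.flatMap (fun d =>
            (pvProdA (factors.map (·.2))).map (fun c => pvExt d (factors.map (·.1)) c)) := by
  induction factors with
  | nil =>
      intro acc
      simp [pvProdA, pvExt]
  | cons kl rest ih =>
      intro acc
      simp only [List.foldl_cons, ih, pvProdA, List.map_cons]
      simp only [List.flatMap_assoc, List.flatMap_map, List.map_flatMap, List.map_map]
      apply List.flatMap_congr
      intro d _
      apply List.flatMap_congr
      intro x _
      apply List.map_congr_left
      intro c _
      rfl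

theorem generate_full_factorial_design_spec : Claim_equal_generate_full_factorial_design := by
  intro factors _
  unfold Spec_generate_full_factorial_design generate_full_factorial_design
    generate_full_factorial_design_alt
  rw [pvFoldl_eq_flatMap_prod]
  simp [pvBuildA, pvExt, List.map_map, Function.comp]
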